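-- pv_equiv track=rewrite | github.com/ITherso/monolith-test | evasion/web_shell.py | _char_code_build
-- ===== SOURCE A (Python) =====
-- def _char_code_build(payload: str, language: str) -> str:
--     """Build strings from character codes"""
--     if language == "php":
--         def to_chr(s: str) -> str:
--             return '.'.join(f"chr({ord(c)})" for c in s)
--
--         # Replace sensitive strings
--         sensitive = ['eval', 'exec', 'system', 'cmd', 'shell']
--
--         for word in sensitive:
--             if word in payload:
--                 payload = payload.replace(f"'{word}'", f"({to_chr(word)})")
--                 payload = payload.replace(f'"{word}"', f"({to_chr(word)})")
--
--         return payload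
--
--     return payload
-- ===== SOURCE B (Python) =====
-- def _char_code_build(payload: str, language: str) -> str:
--     """Build strings from character codes"""
--     if language != "php":
--         return payload
--     for word in ('eval', 'exec', 'system', 'cmd', 'shell'):
--         rep = '(' + '.'.join('chr(%d)' % ord(c) for c in word) + ')'
--         m = len(word)
--         out = []
--         i = 0
--         n = len(payload)
--         while i < n:
--             q = payload[i]
--             if (q == "'" or q == '"') and payload[i + 1:i + 2 + m] == word + q:
--                 out.append(rep)
--                 i += m + 2
--             else:
--                 out.append(q)
--                 i += 1
--         payload = ''.join(out)
--     return payload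
-- ===== Notes on version B (the rewrite author's own statement) =====
-- stated objective: alternative
-- what changed: Per keyword, A does a membership test plus two separate str.replace passes (single-quoted then double-quoted pattern); B does one explicit left-to-right scan that matches a quote, the keyword and the same closing quote in a single pass and needs no membership guard.
import Mathlib
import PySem

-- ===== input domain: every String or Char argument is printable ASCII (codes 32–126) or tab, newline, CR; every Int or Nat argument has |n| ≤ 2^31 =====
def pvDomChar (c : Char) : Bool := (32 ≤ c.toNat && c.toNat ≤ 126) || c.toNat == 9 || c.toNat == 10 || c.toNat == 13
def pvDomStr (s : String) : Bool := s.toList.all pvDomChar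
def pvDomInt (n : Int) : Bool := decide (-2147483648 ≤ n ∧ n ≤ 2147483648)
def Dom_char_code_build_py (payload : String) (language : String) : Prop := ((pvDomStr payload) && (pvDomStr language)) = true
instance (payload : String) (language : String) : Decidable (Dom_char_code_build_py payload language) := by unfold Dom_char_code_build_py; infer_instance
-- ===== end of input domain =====

set_option maxRecDepth 4096


-- B replaces A's per-word pair of str.replace passes (plus a redundant membership guard) with one
-- left-to-right scanner pass per word handling both quote forms at once; objective: alternative.

-- ===== PORT A =====
-- Python inner helper to_chr: '.'.join(f"chr({ord(c)})" for c in s)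
def pvToChr (s : String) : String :=
  PySem.Str.join "." (s.toList.map (fun c => "chr(" ++ PySem.Int.toStr (c.toNat : Int) ++ ")"))

def char_code_build_py (payload : String) (language : String) : String :=
  if language == "php" then
    (["eval", "exec", "system", "cmd", "shell"]).foldl
      (fun p word =>
        if PySem.Str.isIn word p then
          PySem.Str.replace
            (PySem.Str.replace p ("'" ++ word ++ "'") ("(" ++ pvToChr word ++ ")"))
            ("\"" ++ word ++ "\"") ("(" ++ pvToChr word ++ ")")
        else p)
      payload
  else payload

-- ===== PORT B =====
-- B helper: rep = '(' + '.'.join('chr(%d)' % ord(c) for c in word) + ')'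
def pvChrBuild (word : String) : String :=
  "(" ++ PySem.Str.join "." (word.toList.map (fun c => "chr(" ++ PySem.Int.toStr (c.toNat : Int) ++ ")")) ++ ")"

-- B helper: the while-loop scanner — at each position, a quote followed by the word and the same
-- quote is replaced by rep and skipped; otherwise the character is copied.
def scanChars (w r : List Char) (s : List Char) : List Char :=
  match s with
  | [] => []
  | c :: t =>
    if (c == '\'' || c == '"') && List.isPrefixOf (w ++ [c]) t then
      r ++ scanChars w r (List.drop (w.length + 1) t)
    else c :: scanChars w r t
termination_by s.length
decreasing_by
  all_goals simp [List.length_drop]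

def char_code_build_py_alt (payload : String) (language : String) : String :=
  if language == "php" then
    (["eval", "exec", "system", "cmd", "shell"]).foldl
      (fun p word => String.ofList (scanChars word.toList (pvChrBuild word).toList p.toList))
      payload
  else payload

-- ===== PRECONDITION & SPEC =====
def Spec_char_code_build_py (payload : String) (language : String) (out : String) : Prop := out = char_code_build_py_alt payload language
instance (payload : String) (language : String) (out : String) : Decidable (Spec_char_code_build_py payload language out) := by unfold Spec_char_code_build_py; infer_instance

-- ===== CLAIM (what is proved, stated in full; the proofs are below) =====
def Claim_equal_char_code_build_py : Prop := ∀ (payload : String) (language : String), Dom_char_code_build_py payload language → Spec_char_code_build_py payload language (char_code_build_py payload language)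

-- ===== LEMMAS AND PROOFS =====

-- Proof-side model of PySem.Chars.replace (left-to-right, non-overlapping).
def srepl (p r : List Char) (s : List Char) : List Char :=
  match s with
  | [] => []
  | c :: t =>
    if List.isPrefixOf p (c :: t) then r ++ srepl p r (List.drop (p.length - 1) t)
    else c :: srepl p r t
termination_by s.length
decreasing_by
  all_goals simp [List.length_drop]

theorem go_eq_srepl (p r : List Char) (hp : p ≠ []) :
    ∀ (fuel : Nat) (l acc : List Char), l.length ≤ fuel →
      PySem.Chars.replace.go p r fuel l acc = acc.reverse ++ srepl p r l := by
  intro fuel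
  induction fuel with
  | zero =>
    intro l acc h
    have : l = [] := by cases l <;> simp_all
    subst this
    rw [PySem.Chars.replace.go, srepl]
  | succ n ih =>
    intro l acc h
    cases l with
    | nil => rw [PySem.Chars.replace.go, srepl]; simp; omega
    | cons c t =>
      rw [PySem.Chars.replace.go, srepl]
      by_cases hpre : List.isPrefixOf p (c :: t)
      · simp only [hpre, if_true]
        have hlen : p.length ≥ 1 := by cases p <;> simp_all
        have hdrop : List.drop p.length (c :: t) = List.drop (p.length - 1) t := by
          cases hq : p.length with
          | zero => omega
          | succ k => simp
        rw [hdrop, ih (List.drop (p.length - 1) t) (r.reverse ++ acc)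
              (by simp [List.length_drop] at *; omega)]
        simp
      · simp only [hpre, if_false, Bool.false_eq_true]
        rw [ih t (c :: acc) (by simp at h; omega)]
        simp

theorem replace_eq_srepl (s p r : List Char) (hp : p ≠ []) :
    PySem.Chars.replace s p r = srepl p r s := by
  unfold PySem.Chars.replace
  have : p.isEmpty = false := by cases p <;> simp_all
  rw [this]
  simpa using go_eq_srepl p r hp s.length s [] (le_refl _)

-- srepl passes untouched through a block containing no occurrence of the pattern's head char.
theorem srepl_append_not_head (a : Char) (p' r : List Char) :
    ∀ (u x : List Char), a ∉ u →
      srepl (a :: p') r (u ++ x) = u ++ srepl (a :: p') r x := by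
  intro u
  induction u with
  | nil => intro x _; simp
  | cons c u' ih =>
    intro x ha
    have hac : (a == c) = false := beq_eq_false_iff_ne.mpr (List.ne_of_not_mem_cons ha)
    rw [List.cons_append, srepl]
    simp only [List.isPrefixOf_cons₂, hac, Bool.false_and, Bool.false_eq_true, if_false]
    rw [ih x (fun hm => ha (List.mem_cons_of_mem _ hm))]
    simp

-- srepl consumes the pattern at the head and emits the replacement.
theorem srepl_pat (p r x : List Char) (hp : p ≠ []) :
    srepl p r (p ++ x) = r ++ srepl p r x := by
  cases p with
  | nil => exact absurd rfl hp
  | cons c p0 =>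
    rw [List.cons_append, srepl]
    have hpre : List.isPrefixOf (c :: p0) (c :: (p0 ++ x)) := by
      rw [List.isPrefixOf_iff_prefix]
      exact ⟨x, by simp⟩
    simp only [hpre, if_true, List.length_cons, Nat.add_sub_cancel, List.drop_left]

-- A prefix of the rewritten string that avoids the pattern's and replacement's head characters
-- was already a prefix of the original string.
theorem srepl_prefix_reflect (a b : Char) (p' r' : List Char) :
    ∀ (t u : List Char), a ∉ u → b ∉ u →
      u <+: srepl (a :: p') (b :: r') t → u <+: t := by
  intro t
  induction t with
  | nil =>
    intro u _ _ h
    rw [srepl] at h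
    exact h
  | cons c t ih =>
    intro u ha hb h
    rw [srepl] at h
    by_cases hpre : List.isPrefixOf (a :: p') (c :: t)
    · simp only [hpre, if_true] at h
      cases u with
      | nil => exact List.nil_prefix
      | cons d u' =>
        exfalso
        rcases h with ⟨s, hs⟩
        rw [List.cons_append] at hs
        have : d = b := by
          have := congrArg (List.head? ·) hs
          simpa using this
        exact hb (this ▸ List.mem_cons_self)
    · simp only [hpre, Bool.false_eq_true, if_false] at h
      cases u with
      | nil => exact List.nil_prefix
      | cons d u' =>
        rcases h with ⟨s, hs⟩
        rw [List.cons_append] at hs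
        injection hs with h1 h2
        subst h1
        have : u' <+: t :=
          ih u' (by simp_all) (by simp_all) ⟨s, h2⟩
        exact (List.cons_prefix_cons).mpr ⟨rfl, this⟩

-- If the word does not occur in the string, the scanner copies it unchanged.
theorem scan_id (w r : List Char) :
    ∀ (s : List Char), ¬ w <:+: s → scanChars w r s = s := by
  intro s
  induction s with
  | nil => intro _; rw [scanChars]
  | cons c t ih =>
    intro h
    rw [scanChars]
    by_cases hc : ((c == '\'' || c == '"') && List.isPrefixOf (w ++ [c]) t) = true
    · exfalso
      have hpre : (w ++ [c]) <+: t := by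
        rw [← List.isPrefixOf_iff_prefix]
        exact (Bool.and_eq_true _ _ |>.mp hc).2
      have : w <+: t := (List.prefix_append w [c]).trans hpre
      exact h (List.infix_cons this.isInfix)
    · simp only [hc, if_false, Bool.false_eq_true]
      rw [ih (fun hinf => h (List.infix_cons hinf))]

-- Core lemma: the two sequential replaces (single-quoted then double-quoted pattern) equal
-- one combined scanner pass, provided word and replacement contain no quote and the
-- replacement starts with '(' which the word avoids.
theorem srepl_srepl_eq_scan (w r' : List Char)
    (hq1 : '\'' ∉ w) (hq3 : '(' ∉ w)
    (hr2 : '"' ∉ ('(' :: r')) :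
    ∀ (s : List Char),
      srepl ('"' :: (w ++ ['"'])) ('(' :: r')
        (srepl ('\'' :: (w ++ ['\''])) ('(' :: r') s) = scanChars w ('(' :: r') s := by
  intro s
  have H : ∀ (n : Nat) (s : List Char), s.length = n →
      srepl ('"' :: (w ++ ['"'])) ('(' :: r')
        (srepl ('\'' :: (w ++ ['\''])) ('(' :: r') s) = scanChars w ('(' :: r') s := by
    intro n
    induction n using Nat.strong_induction_on with
    | _ n ih =>
      intro s hs
      by_cases h1 : ('\'' :: (w ++ ['\''])) <+: s
      · -- single-quoted occurrence at the head
        rcases h1 with ⟨t, ht⟩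
        subst ht
        rw [srepl_pat _ _ _ (by simp)]
        rw [srepl_append_not_head '"' _ _ ('(' :: r') _ hr2]
        have hscan : scanChars w ('(' :: r') (('\'' :: (w ++ ['\''])) ++ t)
            = ('(' :: r') ++ scanChars w ('(' :: r') t := by
          rw [List.cons_append, scanChars]
          have hpre : List.isPrefixOf (w ++ ['\'']) ((w ++ ['\'']) ++ t) := by
            rw [List.isPrefixOf_iff_prefix]; exact ⟨t, rfl⟩
          simp only [hpre, Bool.and_true, Bool.true_or, beq_self_eq_true, if_true]
          have : List.drop (w.length + 1) ((w ++ ['\'']) ++ t) = t := by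
            have : (w ++ ['\'']).length = w.length + 1 := by simp
            rw [← this, List.drop_left]
          rw [this]
        rw [hscan]
        congr 1
        exact ih t.length (by simp at hs; omega) t rfl
      · by_cases h2 : ('"' :: (w ++ ['"'])) <+: s
        · -- double-quoted occurrence at the head
          rcases h2 with ⟨t, ht⟩
          subst ht
          rw [srepl_append_not_head '\'' _ _ ('"' :: (w ++ ['"'])) _ (by simp_all)]
          rw [srepl_pat _ _ _ (by simp)]
          have hscan : scanChars w ('(' :: r') (('"' :: (w ++ ['"'])) ++ t)
              = ('(' :: r') ++ scanChars w ('(' :: r') t := by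
            rw [List.cons_append, scanChars]
            have hpre : List.isPrefixOf (w ++ ['"']) ((w ++ ['"']) ++ t) := by
              rw [List.isPrefixOf_iff_prefix]; exact ⟨t, rfl⟩
            simp only [hpre, Bool.and_true, Bool.or_true, beq_self_eq_true, if_true]
            have : List.drop (w.length + 1) ((w ++ ['"']) ++ t) = t := by
              have : (w ++ ['"']).length = w.length + 1 := by simp
              rw [← this, List.drop_left]
            rw [this]
          rw [hscan]
          congr 1
          exact ih t.length (by simp at hs; omega) t rfl
        · -- no occurrence at the head
          cases s with
          | nil => rw [srepl]; rw [srepl]; rw [scanChars]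
          | cons c t =>
            have hno1 : ¬ List.isPrefixOf ('\'' :: (w ++ ['\''])) (c :: t) := by
              rw [List.isPrefixOf_iff_prefix]; exact h1
            rw [srepl]
            simp only [hno1, Bool.false_eq_true, if_false]
            rw [srepl]
            have hno2 : ¬ List.isPrefixOf ('"' :: (w ++ ['"'])) (c :: srepl ('\'' :: (w ++ ['\''])) ('(' :: r') t) := by
              intro hcontra
              rw [List.isPrefixOf_iff_prefix] at hcontra
              rcases hcontra with ⟨x, hx⟩
              rw [List.cons_append] at hx
              injection hx with hc hx2
              apply h2
              subst hc
              have hup : (w ++ ['"']) <+: srepl ('\'' :: (w ++ ['\''])) ('(' :: r') t := ⟨x, hx2⟩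
              have hut : (w ++ ['"']) <+: t :=
                srepl_prefix_reflect '\'' '(' _ _ t (w ++ ['"'])
                  (by simp_all) (by simp_all) hup
              exact (List.cons_prefix_cons).mpr ⟨rfl, hut⟩
            simp only [hno2, Bool.false_eq_true, if_false]
            rw [scanChars]
            have hcond : ¬ ((c == '\'' || c == '"') && List.isPrefixOf (w ++ [c]) t) = true := by
              intro hc
              rcases Bool.and_eq_true _ _ |>.mp hc with ⟨hcq, hcp⟩
              rw [List.isPrefixOf_iff_prefix] at hcp
              rcases Bool.or_eq_true _ _ |>.mp hcq with hq | hq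
              · exact h1 (by
                  have : c = '\'' := by simpa using hq
                  subst this
                  rcases hcp with ⟨x, hx⟩
                  exact ⟨x, by rw [List.cons_append, ← hx]⟩)
              · exact h2 (by
                  have : c = '"' := by simpa using hq
                  subst this
                  rcases hcp with ⟨x, hx⟩
                  exact ⟨x, by rw [List.cons_append, ← hx]⟩)
            simp only [hcond, if_false, Bool.false_eq_true]
            congr 1
            exact ih t.length (by simp at hs; omega) t rfl
  exact H s.length s rfl

-- One word-iteration of A (guard + two replaces) equals one scanner pass of B.
theorem step_eq (word rep : String) (p : String)
    (hA : "(" ++ pvToChr word ++ ")" = rep) (hB : pvChrBuild word = rep)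
    (hrep : rep.toList.head? = some '(') (hrq : '"' ∉ rep.toList)
    (h1 : '\'' ∉ word.toList) (h3 : '(' ∉ word.toList) :
    (if PySem.Str.isIn word p then
        PySem.Str.replace
          (PySem.Str.replace p ("'" ++ word ++ "'") ("(" ++ pvToChr word ++ ")"))
          ("\"" ++ word ++ "\"") ("(" ++ pvToChr word ++ ")")
      else p)
    = String.ofList (scanChars word.toList (pvChrBuild word).toList p.toList) := by
  obtain ⟨r', hr'⟩ : ∃ r', rep.toList = '(' :: r' := by
    cases hcl : rep.toList with
    | nil => rw [hcl] at hrep; simp at hrep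
    | cons c cs =>
      rw [hcl] at hrep
      have hc : c = '(' := by simpa using hrep
      exact ⟨cs, congrArg (· :: cs) hc⟩
  rw [hA, hB, hr']
  by_cases hin : PySem.Str.isIn word p = true
  · simp only [hin, if_true]
    apply String.toList_inj.mp
    rw [String.toList_ofList, PySem.Str.toList_replace, PySem.Str.toList_replace]
    have hp1 : ("'" ++ word ++ "'").toList = '\'' :: (word.toList ++ ['\'']) := by
      rw [String.toList_append, String.toList_append]; rfl
    have hp2 : ("\"" ++ word ++ "\"").toList = '"' :: (word.toList ++ ['"']) := by
      rw [String.toList_append, String.toList_append]; rfl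
    rw [hp1, hp2, hr']
    rw [replace_eq_srepl _ _ _ (by simp), replace_eq_srepl _ _ _ (by simp)]
    exact srepl_srepl_eq_scan word.toList r' h1 h3 (hr' ▸ hrq) p.toList
  · have hfalse : PySem.Str.isIn word p = false := by
      cases hb : PySem.Str.isIn word p
      · rfl
      · exact absurd hb hin
    simp only [hfalse, Bool.false_eq_true, if_false]
    have hninf : ¬ word.toList <:+: p.toList := by
      have := hfalse
      simp only [PySem.Str.isIn] at this
      exact (PySem.Chars.isIn_eq_false_iff _ _).mp this
    rw [scan_id _ _ _ hninf, String.ofList_toList]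

-- ===== VERDICT (by name: the statement is the Claim_ definition above) =====
theorem char_code_build_py_spec : Claim_equal_char_code_build_py := by
  intro payload language _
  unfold Spec_char_code_build_py char_code_build_py char_code_build_py_alt
  by_cases hl : (language == "php") = true
  · rw [if_pos hl, if_pos hl]
    rw [List.foldl_cons, List.foldl_cons, List.foldl_cons, List.foldl_cons, List.foldl_cons,
        List.foldl_nil, List.foldl_cons, List.foldl_cons, List.foldl_cons, List.foldl_cons,
        List.foldl_cons, List.foldl_nil]
    rw [step_eq "eval" "(chr(101).chr(118).chr(97).chr(108))" _ (by decide) (by decide)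
          (by decide) (by decide) (by decide) (by decide)]
    rw [step_eq "exec" "(chr(101).chr(120).chr(101).chr(99))" _ (by decide) (by decide)
          (by decide) (by decide) (by decide) (by decide)]
    rw [step_eq "system" "(chr(115).chr(121).chr(115).chr(116).chr(101).chr(109))" _ (by decide) (by decide)
          (by decide) (by decide) (by decide) (by decide)]
    rw [step_eq "cmd" "(chr(99).chr(109).chr(100))" _ (by decide) (by decide)
          (by decide) (by decide) (by decide) (by decide)]
    rw [step_eq "shell" "(chr(115).chr(104).chr(101).chr(108).chr(108))" _ (by decide) (by decide)
          (by decide) (by decide) (by decide) (by decide)]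
  · rw [if_neg hl, if_neg hl]
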